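-- pv_equiv track=rewrite | github.com/MikhailBaranov2023/bank_operation | src/utils.py | last_five_operation
-- ===== SOURCE A (Python) =====
-- def last_five_operation(read_file):
--     read_file.reverse()
--     executed_list = []
--     for i in read_file:
--         if 'state' in i.keys():
--             if i['state'] == 'EXECUTED':
--                 executed_list.append(i)
--             else:
--                 continue
--         else:
--             continue
--     get_file = executed_list[0:5]
--     get_file.reverse()
--     return get_file
-- ===== SOURCE B (Python) =====
-- from collections import deque
--
-- def last_five_operation(read_file):
--     window = deque(maxlen=5)
--     for i in read_file:
--         if i.get('state') == 'EXECUTED':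
--             window.append(i)
--     return list(window)
-- ===== Notes on version B (the rewrite author's own statement) =====
-- stated objective: simpler
-- what changed: Single forward pass keeping the last five EXECUTED operations in a bounded deque(maxlen=5), instead of reversing the list, filtering, slicing the first five and reversing again; B does not mutate its argument (A reverses read_file in place) - the equivalence is about the return value only.
import Mathlib
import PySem

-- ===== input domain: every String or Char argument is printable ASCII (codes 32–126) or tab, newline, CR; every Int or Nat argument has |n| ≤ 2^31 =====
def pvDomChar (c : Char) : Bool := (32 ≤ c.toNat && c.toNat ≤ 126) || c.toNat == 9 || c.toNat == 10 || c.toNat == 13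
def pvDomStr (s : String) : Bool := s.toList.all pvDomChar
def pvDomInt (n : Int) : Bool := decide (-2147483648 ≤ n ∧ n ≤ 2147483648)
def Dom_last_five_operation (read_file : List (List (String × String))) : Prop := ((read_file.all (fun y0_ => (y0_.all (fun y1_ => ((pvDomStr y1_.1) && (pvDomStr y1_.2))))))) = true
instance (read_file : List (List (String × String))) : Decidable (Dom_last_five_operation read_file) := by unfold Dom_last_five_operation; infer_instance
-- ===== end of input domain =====

-- B keeps a bounded 5-element sliding window in one forward pass instead of A's
-- reverse / filter / slice-first-five / reverse; the equivalence is about the RETURN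
-- value only (A reverses its argument in place, B leaves it untouched).

-- ===== PORT A =====
-- 'state' in i.keys()  (dict as association list, first-match lookup)
def pvHasState (i : List (String × String)) : Bool := (i.map Prod.fst).contains "state"
-- i['state']  (first match; only evaluated under pvHasState in A)
def pvGetState (i : List (String × String)) : String :=
  (((i.find? (fun kv => kv.1 == "state")).map Prod.snd).getD "")

def last_five_operation (read_file : List (List (String × String))) : List (List (String × String)) :=
  let rf := read_file.reverse
  let executed_list := rf.foldl (fun acc i =>
    if pvHasState i then
      (if pvGetState i == "EXECUTED" then acc ++ [i] else acc)
    else acc) []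
  let get_file := PySem.List.slice executed_list (some 0) (some 5)
  get_file.reverse

-- ===== PORT B =====
-- i.get('state') == 'EXECUTED'
def pvExec (i : List (String × String)) : Bool :=
  match i.find? (fun kv => kv.1 == "state") with
  | some kv => kv.2 == "EXECUTED"
  | none => false

-- deque(maxlen=5).append: drop the oldest element when the window is full
def pvStep (w : List (List (String × String))) (i : List (String × String)) : List (List (String × String)) :=
  if pvExec i then (if 5 ≤ w.length then w.drop 1 ++ [i] else w ++ [i]) else w

def last_five_operation_alt (read_file : List (List (String × String))) : List (List (String × String)) :=
  read_file.foldl pvStep []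

-- ===== PRECONDITION & SPEC =====
def Spec_last_five_operation (read_file : List (List (String × String))) (out : List (List (String × String))) : Prop := out = last_five_operation_alt read_file
instance (read_file : List (List (String × String))) (out : List (List (String × String))) : Decidable (Spec_last_five_operation read_file out) := by unfold Spec_last_five_operation; infer_instance

-- ===== CLAIM (what is proved, stated in full; the proofs are below) =====
def Claim_equal_last_five_operation : Prop := ∀ (read_file : List (List (String × String))), Dom_last_five_operation read_file → Spec_last_five_operation read_file (last_five_operation read_file)

-- ===== LEMMAS AND PROOFS =====

-- A's nested test equals B's single predicate
lemma hasState_getState_eq_exec (i : List (String × String)) :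
    (if pvHasState i then (if pvGetState i == "EXECUTED" then true else false) else false) = pvExec i := by
  induction i with
  | nil => rfl
  | cons kv t ih =>
    by_cases h : kv.1 = "state"
    · simp only [pvHasState, pvGetState, pvExec, List.map_cons, List.contains_cons, List.find?, h]
      rw [Bool.eq_iff_iff]
      simp
    · have hb : (kv.1 == "state") = false := beq_eq_false_iff_ne.mpr h
      have hb' : ("state" == kv.1) = false := beq_eq_false_iff_ne.mpr (fun hh => h hh.symm)
      simp only [pvHasState, pvGetState, pvExec, List.map_cons, List.contains_cons, List.find?, hb,
        hb', Bool.false_or] at *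
      exact ih

lemma rtake_append_rtake (n : Nat) (xs ys : List (List (String × String))) :
    ((xs.rtake n) ++ ys).rtake n = (xs ++ ys).rtake n := by
  apply List.reverse_injective
  simp only [List.rtake_eq_reverse_take_reverse, List.reverse_reverse, List.reverse_append]
  rw [List.take_append, List.take_append, List.take_take]
  congr 2
  omega

lemma step_eq_rtake (w : List (List (String × String))) (i : List (String × String))
    (hw : w.length ≤ 5) : pvStep w i = if pvExec i then (w ++ [i]).rtake 5 else w := by
  unfold pvStep
  by_cases he : pvExec i
  · simp only [he, if_true]
    by_cases h5 : 5 ≤ w.length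
    · rw [if_pos h5]
      cases w with
      | nil => simp at h5
      | cons a t =>
        have ht : t.length = 4 := by simp at h5 hw; omega
        simp [List.rtake, ht]
    · rw [if_neg h5]
      have h4 : w.length - 4 = 0 := by omega
      simp [List.rtake, h4]
  · simp [he]

lemma length_rtake_le (n : Nat) (xs : List (List (String × String))) : (xs.rtake n).length ≤ n := by
  simp [List.rtake_eq_reverse_take_reverse]

lemma foldl_step_eq (l : List (List (String × String))) :
    ∀ (w : List (List (String × String))), w.length ≤ 5 →
      l.foldl pvStep w = (w ++ l.filter pvExec).rtake 5 := by
  induction l with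
  | nil =>
    intro w hw
    simp [List.rtake, Nat.sub_eq_zero_of_le hw]
  | cons i t ih =>
    intro w hw
    by_cases he : pvExec i
    · have : List.foldl pvStep w (i :: t) = t.foldl pvStep ((w ++ [i]).rtake 5) := by
        simp [List.foldl_cons, step_eq_rtake w i hw, he]
      rw [this, ih _ (length_rtake_le 5 (w ++ [i])), rtake_append_rtake]
      simp [he]
    · have : List.foldl pvStep w (i :: t) = t.foldl pvStep w := by
        simp [List.foldl_cons, step_eq_rtake w i hw, he]
      rw [this, ih _ hw]
      simp [he]

-- ===== VERDICT (by name: the statement is the Claim_ definition above) =====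
theorem last_five_operation_spec : Claim_equal_last_five_operation := by
  intro rf _
  show last_five_operation rf = last_five_operation_alt rf
  unfold last_five_operation last_five_operation_alt
  have hbody : rf.reverse.foldl (fun acc i =>
      if pvHasState i then (if pvGetState i == "EXECUTED" then acc ++ [i] else acc) else acc)
      ([] : List (List (String × String)))
      = rf.reverse.foldl (fun acc i => if pvExec i then acc ++ [i] else acc) [] := by
    apply PySem.List.foldl_congr_mem
    intro acc i _
    rw [← hasState_getState_eq_exec i]
    by_cases h1 : pvHasState i <;> by_cases h2 : pvGetState i == "EXECUTED" <;> simp [h1, h2]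
  simp only [hbody, PySem.List.foldl_append_if_eq_filter, List.nil_append]
  rw [foldl_step_eq rf [] (by simp)]
  have hslice : ∀ (xs : List (List (String × String))), PySem.List.slice xs (some 0) (some 5) = xs.take 5 := by
    intro xs
    rw [PySem.List.slice_zero_start, show (some (5:Int)) = some ((5:Nat):Int) from by norm_num,
      PySem.List.slice_to_natCast]
  rw [hslice]
  simp [List.rtake_eq_reverse_take_reverse, List.filter_reverse]
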